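-- pv_equiv track=rewrite | github.com/Um-king/Algorithm | 프로그래머스/1/140108. 문자열 나누기/문자열 나누기.py | solution
-- ===== SOURCE A (Python) =====
-- def solution(s):
--     answer, cnt1, cnt2, index = 0, 0, 0, 0
--     w1, w2 = s[0], ""
--
--     while len(s) > 1:
--         if index == len(s):
--             return answer + 1
--         if w1 == s[index]:
--             cnt1 += 1
--         else:
--             cnt2 += 1
--
--         index += 1
--
--         if cnt1 == cnt2:
--             s = s[index:]
--             cnt1, cnt2, index = 0, 0, 0
--             if len(s) > 1:
--                 w1 =  s[index]
--             answer += 1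
--
--     return answer + len(s)
-- ===== SOURCE B (Python) =====
-- def solution(s):
--     answer = 0
--     first = None
--     cnt1 = cnt2 = 0
--     for ch in s:
--         if first is None:
--             first = ch
--         if ch == first:
--             cnt1 += 1
--         else:
--             cnt2 += 1
--         if cnt1 == cnt2:
--             answer += 1
--             cnt1 = cnt2 = 0
--             first = None
--     return answer + (1 if first is not None else 0)
-- ===== Notes on version B (the rewrite author's own statement) =====
-- stated objective: faster
-- what changed: Replaced the while-loop that repeatedly re-slices the string (s = s[index:]) at every balanced point with a single linear for-pass over the characters keeping only the two counters and the current group's first character, so no substrings are ever built.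
import Mathlib
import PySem

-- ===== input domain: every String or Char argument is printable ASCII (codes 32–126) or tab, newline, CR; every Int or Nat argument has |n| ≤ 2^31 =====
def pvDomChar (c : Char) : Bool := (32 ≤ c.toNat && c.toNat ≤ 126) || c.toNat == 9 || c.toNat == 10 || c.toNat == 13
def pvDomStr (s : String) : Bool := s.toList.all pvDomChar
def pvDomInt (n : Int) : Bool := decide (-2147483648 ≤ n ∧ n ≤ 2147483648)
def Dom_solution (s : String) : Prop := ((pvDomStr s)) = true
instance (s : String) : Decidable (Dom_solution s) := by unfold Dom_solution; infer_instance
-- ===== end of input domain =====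

-- B replaces A's repeated slicing loop by one linear pass over the characters;
-- equality of return values is proved on every nonempty string (A raises IndexError on "").

-- ===== PORT A =====
-- A's while-loop: state (answer, cnt1, cnt2, index, s, w1); 's = s[index:]' is List.drop.
-- Python's 'if index == len(s)' is written 's.length ≤ index' — in Python index never
-- exceeds len(s), so this totalization is exact on all reachable states.
def solutionLoop (answer cnt1 cnt2 : Int) (index : Nat) (s : List Char) (w1 : Char) : Int :=
  if 1 < s.length then
    if s.length ≤ index then answer + 1
    else
      let c := s.getD index 'x'
      let cnt1' := if w1 == c then cnt1 + 1 else cnt1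
      let cnt2' := if w1 == c then cnt2 else cnt2 + 1
      let index' := index + 1
      if cnt1' == cnt2' then
        let s' := s.drop index'
        solutionLoop (answer + 1) 0 0 0 s' (if 1 < s'.length then s'.getD 0 'x' else w1)
      else
        solutionLoop answer cnt1' cnt2' index' s w1
  else answer + (s.length : Int)
termination_by (s.length, s.length - index)
decreasing_by
  · simp only [List.length_drop]; left; omega
  · right; omega

def solution (s : String) : Int :=
  match s.toList with
  | [] => 0          -- Python raises IndexError at s[0]; excluded by Pre_solution
  | w1 :: _ => solutionLoop 0 0 0 0 s.toList w1

-- ===== PORT B =====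
def solutionAltLoop (answer cnt1 cnt2 : Int) (first : Option Char) (rest : List Char) : Int :=
  match rest with
  | [] => answer + (match first with | some _ => 1 | none => 0)
  | ch :: rest' =>
    let f := first.getD ch
    let cnt1' := if ch == f then cnt1 + 1 else cnt1
    let cnt2' := if ch == f then cnt2 else cnt2 + 1
    if cnt1' == cnt2' then
      solutionAltLoop (answer + 1) 0 0 none rest'
    else
      solutionAltLoop answer cnt1' cnt2' (some f) rest'

def solution_alt (s : String) : Int :=
  solutionAltLoop 0 0 0 none s.toList

-- ===== PRECONDITION & SPEC =====
-- Pre_ excludes exactly the empty string, on which A raises IndexError at s[0].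
def Pre_solution (s : String) : Prop := s ≠ ""
instance (s : String) : Decidable (Pre_solution s) := by unfold Pre_solution; infer_instance
def pvWitness_solution : String := "aabbac"

def Spec_solution (s : String) (out : Int) : Prop := out = solution_alt s
instance (s : String) (out : Int) : Decidable (Spec_solution s out) := by unfold Spec_solution; infer_instance

-- ===== CLAIM (what is proved, stated in full; the proofs are below) =====
def Claim_equal_solution : Prop := ∀ (s : String), Dom_solution s → Pre_solution s → Spec_solution s (solution s)

-- ===== LEMMAS AND PROOFS =====

-- Invariant relating A's (index into s) state to B's (suffix of s) state:
-- while a group is open (index ≠ 0) B's remembered first char is A's w1, and at a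
-- group boundary (index = 0, with 1 < len) A's w1 is the head of the current suffix.
theorem loop_eq (n : Nat) :
    ∀ (s : List Char) (index : Nat) (answer cnt1 cnt2 : Int) (w1 : Char),
      2 * s.length - index ≤ n → index ≤ s.length →
      (index = 0 → 1 < s.length → w1 = s.getD 0 'x') →
      solutionLoop answer cnt1 cnt2 index s w1
        = solutionAltLoop answer cnt1 cnt2
            (if index = 0 then none else some w1) (s.drop index) := by
  induction n with
  | zero =>
    intro s index answer cnt1 cnt2 w1 hm hidx _
    have h0 : s.length = 0 := by omega
    have hi : index = 0 := by omega
    rw [solutionLoop]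
    simp [hi, List.eq_nil_of_length_eq_zero h0, solutionAltLoop]
  | succ n ih =>
    intro s index answer cnt1 cnt2 w1 hm hidx hw
    rw [solutionLoop]
    by_cases hlen : 1 < s.length
    · simp only [hlen, if_true]
      by_cases hend : s.length ≤ index
      · have hi0 : ¬ index = 0 := by omega
        have hd : s.drop index = [] := List.drop_eq_nil_of_le hend
        rw [hd, if_neg hi0]
        simp [hend, solutionAltLoop]
      · simp only [hend, if_false]
        have hlt : index < s.length := by omega
        obtain ⟨ch, t', hdt⟩ : ∃ ch t', s.drop index = ch :: t' := by
          cases h : s.drop index with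
          | nil => exact absurd (congrArg List.length h) (by simp; omega)
          | cons a b => exact ⟨a, b, rfl⟩
        have hopt : s[index]? = some ch := by
          have h0 : (List.drop index s)[(0 : Nat)]? = s[index + 0]? := List.getElem?_drop
          rw [hdt] at h0; simpa using h0.symm
        have hgd : s.getD index 'x' = ch := by simp [List.getD, hopt]
        have hdt2 : s.drop (index + 1) = t' := by
          rw [← List.tail_drop, hdt]; rfl
        have hlt' : t'.length = s.length - (index + 1) := by
          rw [← hdt2]; exact List.length_drop
        rw [hdt, solutionAltLoop, hgd, hdt2]
        have ha : 2 * t'.length - 0 ≤ n := by omega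
        have hb : (0 : Nat) ≤ t'.length := Nat.zero_le _
        have ha' : 2 * s.length - (index + 1) ≤ n := by omega
        have hb' : index + 1 ≤ s.length := by omega
        by_cases h0 : index = 0
        · -- group boundary: both sides count the head into cnt1
          subst h0
          have hw1 : w1 = ch := by rw [← hgd]; exact hw rfl hlen
          have hcwb : (0 : Nat) = 0 → 1 < t'.length →
              (if 1 < t'.length then t'.getD 0 'x' else ch) = t'.getD 0 'x' := by
            intro _ hx; rw [if_pos hx]
          have hcwb' : 0 + 1 = 0 → 1 < s.length → ch = s.getD 0 'x' := by
            intro hx; exact absurd hx (Nat.succ_ne_zero _)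
          simp only [Option.getD_none, hw1, beq_self_eq_true, if_true]
          by_cases heq : (cnt1 + 1 == cnt2) = true
          · simp only [heq, if_true]
            exact (ih _ _ _ _ _ _ ha hb hcwb).trans (by rw [if_pos rfl, List.drop_zero])
          · simp only [heq, Bool.false_eq_true, if_false]
            exact (ih _ _ _ _ _ _ ha' hb' hcwb').trans
              (by rw [if_neg (Nat.succ_ne_zero _), hdt2])
        · -- mid-group: B's first char is some w1
          rw [if_neg h0, Option.getD_some,
            show (ch == w1) = (w1 == ch) from Bool.beq_comm]
          have hcw : (0 : Nat) = 0 → 1 < t'.length →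
              (if 1 < t'.length then t'.getD 0 'x' else w1) = t'.getD 0 'x' := by
            intro _ hx; rw [if_pos hx]
          have hcw' : index + 1 = 0 → 1 < s.length → w1 = s.getD 0 'x' := by
            intro hx; exact absurd hx (Nat.succ_ne_zero _)
          by_cases hc : (w1 == ch) = true
          · simp only [hc, if_true]
            by_cases heq : (cnt1 + 1 == cnt2) = true
            · simp only [heq, if_true]
              exact (ih _ _ _ _ _ _ ha hb hcw).trans (by rw [if_pos rfl, List.drop_zero])
            · simp only [heq, Bool.false_eq_true, if_false]
              exact (ih _ _ _ _ _ _ ha' hb' hcw').trans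
                (by rw [if_neg (Nat.succ_ne_zero _), hdt2])
          · simp only [Bool.not_eq_true] at hc
            simp only [hc, Bool.false_eq_true, if_false]
            by_cases heq : (cnt1 == cnt2 + 1) = true
            · simp only [heq, if_true]
              exact (ih _ _ _ _ _ _ ha hb hcw).trans (by rw [if_pos rfl, List.drop_zero])
            · simp only [heq, Bool.false_eq_true, if_false]
              exact (ih _ _ _ _ _ _ ha' hb' hcw').trans
                (by rw [if_neg (Nat.succ_ne_zero _), hdt2])
    · -- exit branch: s.length ≤ 1
      simp only [hlen, if_false]
      have hcases : s.length = 0 ∨ s.length = 1 := by omega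
      rcases hcases with h0 | h1
      · have hi : index = 0 := by omega
        rw [List.eq_nil_of_length_eq_zero h0] at *
        simp [hi, solutionAltLoop]
      · obtain ⟨c, hc⟩ : ∃ c, s = [c] := List.length_eq_one_iff.mp h1
        subst hc
        have hcases2 : index = 0 ∨ index = 1 := by omega
        rcases hcases2 with hi | hi
        · subst hi
          rw [List.drop_zero, solutionAltLoop]
          simp only [Option.getD_none, beq_self_eq_true, if_true]
          by_cases heq : (cnt1 + 1 == cnt2) = true
          · simp [heq, solutionAltLoop]
          · simp [heq, solutionAltLoop]
        · subst hi
          simp [solutionAltLoop]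

-- ===== VERDICT (by name: the statement is the Claim_ definition above) =====
theorem solution_spec : Claim_equal_solution := by
  intro s _ hpre
  unfold Spec_solution solution solution_alt
  cases hl : s.toList with
  | nil => exact absurd (String.toList_eq_nil_iff.mp hl) hpre
  | cons w1 t =>
    have hm : (match w1 :: t with
        | [] => (0 : Int)
        | w1' :: _ => solutionLoop 0 0 0 0 (w1 :: t) w1')
        = solutionLoop 0 0 0 0 (w1 :: t) w1 := rfl
    rw [hm, loop_eq (2 * (w1 :: t).length) _ 0 _ _ _ _ (by omega) (by omega)
        (by intro _ _; simp)]
    simp
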